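-- pv_equiv track=rewrite | github.com/RafayAK/CodingPrep | DailyCodingProblem/189_Google_Length_Of_The_Longest_Subarray_With_Distinct_Elements.py | long_distinct_subarray
-- ===== SOURCE A (Python) =====
-- def long_distinct_subarray(array):
--     tail, head = 0, 1
--
--     longest_subarray_len = 0
--     while head <= len(array) and tail != head:
--         elements = array[tail:head]
--         s = set(elements)
--         if len(elements) == len(s):  # distinct only if len(elements) == len(set(elements)
--             if len(s) > longest_subarray_len:
--                 longest_subarray_len = len(s)
--             head+=1
--         else:
--             tail+=1
--
--     return longest_subarray_len
-- ===== SOURCE B (Python) =====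
-- def long_distinct_subarray(array):
--     # Sliding window: last[x] = most recent index of x; the window [tail, head]
--     # always holds distinct elements, tail jumps past the previous occurrence.
--     n = len(array)
--     last = {}
--     tail = 0
--     best = 0
--     for head in range(n):
--         x = array[head]
--         k = last.get(x)
--         if k is not None and k >= tail:
--             tail = k + 1
--         last[x] = head
--         if head + 1 - tail > best:
--             best = head + 1 - tail
--     return best
-- ===== Notes on version B (the rewrite author's own statement) =====
-- stated objective: faster
-- what changed: Replaces A's O(n*k)-per-step window walk (re-slicing the array and rebuilding a set from scratch at every step) with the one-pass sliding window keyed by a last-occurrence dictionary: tail jumps directly past the previous occurrence, so each element is handled O(1) times.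
import Mathlib
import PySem

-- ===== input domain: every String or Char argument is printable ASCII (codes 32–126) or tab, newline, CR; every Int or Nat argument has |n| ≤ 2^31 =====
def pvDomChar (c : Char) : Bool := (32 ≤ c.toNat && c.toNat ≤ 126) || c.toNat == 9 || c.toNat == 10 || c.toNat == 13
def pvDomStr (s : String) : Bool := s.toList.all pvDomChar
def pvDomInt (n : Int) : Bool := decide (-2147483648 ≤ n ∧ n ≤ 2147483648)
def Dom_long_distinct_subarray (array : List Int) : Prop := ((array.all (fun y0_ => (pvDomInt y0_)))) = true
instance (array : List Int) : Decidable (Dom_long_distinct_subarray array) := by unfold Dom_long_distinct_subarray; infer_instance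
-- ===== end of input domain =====

-- B replaces A's window walk (re-slicing the array and rebuilding a set every iteration) by the
-- one-pass sliding window with a last-occurrence dictionary: asymptotically faster.

-- ===== PORT A =====
-- A's while loop: state (tail, head, longest_subarray_len); window = array[tail:head] built
-- as a slice, distinctness tested by comparing the slice's length with its set's size.
def pvALoop (array : List Int) (tail head : Nat) (best : Int) : Int :=
  if head ≤ array.length ∧ tail ≠ head then
    let elements := PySem.List.slice array (some (tail : Int)) (some (head : Int))
    let s := PySem.Set.ofList elements
    if elements.length = s.length then
      pvALoop array tail (head + 1) (if (s.length : Int) > best then (s.length : Int) else best)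
    else
      pvALoop array (tail + 1) head best
  else best
termination_by 2 * (array.length + 1 - head) + (head - tail)
decreasing_by
  · rename_i hc _
    obtain ⟨h1, -⟩ := hc
    omega
  · -- the window is not distinct, hence nonempty, hence tail < head
    rename_i hc hne
    obtain ⟨h1, h2⟩ := hc
    have hle := PySem.Set.length_ofList_le (PySem.List.slice array (some (tail : Int)) (some (head : Int)))
    have hpos : 0 < (PySem.List.slice array (some (tail : Int)) (some (head : Int))).length := by
      simp only [elements, s] at hne
      omega
    rw [PySem.List.slice_natCast] at hpos
    simp only [List.length_take, List.length_drop] at hpos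
    omega

def long_distinct_subarray (array : List Int) : Int :=
  pvALoop array 0 1 0

-- ===== PORT B =====
-- B's for loop: last[x] = most recent index of x; window [tail, head] stays duplicate-free,
-- tail jumps past the previous occurrence of x when x re-appears inside the window.
def pvWinLoop (array : List Int) (last : PySem.Dict Int Int) (tail best head : Nat) : Nat :=
  if head < array.length then
    let x := PySem.List.pyGetD array (head : Int) 0
    let tail' :=
      match PySem.Dict.get? last x with
      | some k => if (tail : Int) ≤ k then (k + 1).toNat else tail
      | none => tail
    let last' := PySem.Dict.insert last x (head : Int)
    let best' := if head + 1 - tail' > best then head + 1 - tail' else best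
    pvWinLoop array last' tail' best' (head + 1)
  else best
termination_by array.length - head
decreasing_by rename_i h; omega

def long_distinct_subarray_alt (array : List Int) : Int :=
  (pvWinLoop array PySem.Dict.empty 0 0 0 : Nat)

-- ===== PRECONDITION & SPEC =====
def Spec_long_distinct_subarray (array : List Int) (out : Int) : Prop := out = long_distinct_subarray_alt array
instance (array : List Int) (out : Int) : Decidable (Spec_long_distinct_subarray array out) := by unfold Spec_long_distinct_subarray; infer_instance

-- ===== CLAIM (what is proved, stated in full; the proofs are below) =====
def Claim_equal_long_distinct_subarray : Prop := ∀ (array : List Int), Dom_long_distinct_subarray array → Spec_long_distinct_subarray array (long_distinct_subarray array)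

-- ===== LEMMAS AND PROOFS =====

-- one-step unfolding of A's loop with the slice written as drop/take
theorem pvALoop_unfold (array : List Int) (tail head : Nat) (best : Int) :
    pvALoop array tail head best =
      if head ≤ array.length ∧ tail ≠ head then
        (if ((array.drop tail).take (head - tail)).length
            = (PySem.Set.ofList ((array.drop tail).take (head - tail))).length then
          pvALoop array tail (head + 1)
            (if ((PySem.Set.ofList ((array.drop tail).take (head - tail))).length : Int) > best
             then ((PySem.Set.ofList ((array.drop tail).take (head - tail))).length : Int) else best)
        else pvALoop array (tail + 1) head best)
      else best := by
  rw [pvALoop]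
  simp only [PySem.List.slice_natCast]

-- pure version of pvPrefixLen (accumulator removed)
def pvP (xs : List Int) (seen : PySem.Set Int) : Nat :=
  match xs with
  | [] => 0
  | x :: rest =>
      if PySem.Set.contains seen x then 0
      else pvP rest (PySem.Set.add seen x) + 1

-- maximum of pvP over all suffixes
def pvS : List Int → Nat
  | [] => 0
  | x :: r => max (pvP (x :: r) PySem.Set.empty) (pvS r)

theorem pvP_le_length (xs : List Int) (seen : PySem.Set Int) : pvP xs seen ≤ xs.length := by
  induction xs generalizing seen with
  | nil => simp [pvP]
  | cons x rest ih =>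
      simp only [pvP]
      split
      · simp
      · simpa using ih (PySem.Set.add seen x)

theorem pvP_ge (xs : List Int) (seen : PySem.Set Int) (m : Nat) (hm : m ≤ xs.length)
    (hnd : (xs.take m).Nodup) (hdisj : ∀ a ∈ xs.take m, a ∉ seen) : m ≤ pvP xs seen := by
  induction xs generalizing seen m with
  | nil => simp at hm; omega
  | cons x rest ih =>
      cases m with
      | zero => omega
      | succ k =>
          rw [List.take_succ_cons, List.nodup_cons] at hnd
          have hx : x ∉ seen := hdisj x (by simp [List.take_succ_cons])
          simp only [pvP]
          rw [if_neg (by simpa [PySem.Set.contains_iff] using hx)]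
          have hk : k ≤ pvP rest (PySem.Set.add seen x) := by
            apply ih _ k (by simpa using hm) hnd.2
            intro a ha
            rw [PySem.Set.mem_add]
            rintro (haseen | rfl)
            · exact hdisj a (by simp [List.take_succ_cons, ha]) haseen
            · exact hnd.1 ha
          omega

theorem pvP_le_of_mem_seen (xs : List Int) (seen : PySem.Set Int) (m : Nat)
    (h : ∃ a ∈ xs.take (m + 1), a ∈ seen) : pvP xs seen ≤ m := by
  induction xs generalizing seen m with
  | nil => simp [pvP]
  | cons x rest ih =>
      obtain ⟨a, ha, hseen⟩ := h
      simp only [pvP]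
      split
      · omega
      · rename_i hx
        rw [PySem.Set.contains_iff] at hx
        have hxseen : x ∉ seen := hx
        cases m with
        | zero =>
            rw [List.take_succ_cons, List.take_zero] at ha
            simp only [List.mem_singleton] at ha
            exact absurd (ha ▸ hseen) hxseen
        | succ k =>
            rw [List.take_succ_cons] at ha
            rcases List.mem_cons.mp ha with rfl | ha
            · exact absurd hseen hxseen
            · have : pvP rest (PySem.Set.add seen x) ≤ k :=
                ih _ k ⟨a, ha, by rw [PySem.Set.mem_add]; exact Or.inl hseen⟩
              omega

theorem pvP_le_of_not_nodup (xs : List Int) (seen : PySem.Set Int) (m : Nat)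
    (h : ¬ (xs.take (m + 1)).Nodup) : pvP xs seen ≤ m := by
  induction xs generalizing seen m with
  | nil => simp at h
  | cons x rest ih =>
      simp only [pvP]
      split
      · omega
      · cases m with
        | zero =>
            rw [List.take_succ_cons, List.take_zero] at h
            simp at h
        | succ k =>
            rw [List.take_succ_cons, List.nodup_cons] at h
            rcases Decidable.not_and_iff_or_not.mp h with hmem | hnd
            · rw [not_not] at hmem
              have : pvP rest (PySem.Set.add seen x) ≤ k :=
                pvP_le_of_mem_seen rest (PySem.Set.add seen x) k
                  ⟨x, hmem, by rw [PySem.Set.mem_add]; exact Or.inr rfl⟩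
              omega
            · have := ih (PySem.Set.add seen x) k hnd
              omega

-- lists of length at most one have no duplicates
theorem nodup_of_len_le_one (l : List Int) (h : l.length ≤ 1) : l.Nodup := by
  cases l with
  | nil => simp
  | cons a t =>
      cases t with
      | nil => simp
      | cons b t' => simp at h

-- A's distinctness test: list length = set size ↔ Nodup
theorem set_len_eq_iff_nodup (l : List Int) :
    l.length = (PySem.Set.ofList l).length ↔ l.Nodup := by
  constructor
  · intro h
    by_contra hnd
    have hlt : (PySem.Set.ofList l).length < l.length := by
      clear h
      induction l with
      | nil => simp at hnd
      | cons x r ih =>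
          rw [PySem.Set.ofList_cons]
          have hle := PySem.Set.length_ofList_le r
          have hdle : (PySem.Set.discard (PySem.Set.ofList r) x).length ≤ (PySem.Set.ofList r).length :=
            List.length_filter_le _ _
          rcases Decidable.not_and_iff_or_not.mp (by simpa [List.nodup_cons] using hnd) with hmem | hnd'
          · rw [not_not] at hmem
            have hxr : x ∈ PySem.Set.ofList r := (PySem.Set.mem_ofList r x).mpr hmem
            have : (PySem.Set.discard (PySem.Set.ofList r) x).length < (PySem.Set.ofList r).length :=
              List.length_filter_lt_length_iff_exists.mpr ⟨x, hxr, by simp⟩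
            simp only [List.length_cons]
            omega
          · have := ih hnd'
            simp only [List.length_cons]
            omega
    omega
  · intro h
    rw [PySem.Set.ofList_eq_self_of_nodup l h]

theorem pvP_le_pvS (xs : List Int) : pvP xs PySem.Set.empty ≤ pvS xs := by
  cases xs with
  | nil => simp [pvS, pvP]
  | cons x r => exact le_max_left _ _

theorem pvS_le_length (xs : List Int) : pvS xs ≤ xs.length := by
  induction xs with
  | nil => simp [pvS]
  | cons x r ih =>
      simp only [pvS, List.length_cons, max_le_iff]
      exact ⟨pvP_le_length _ _, by omega⟩

theorem pvS_of_nodup (xs : List Int) (h : xs.Nodup) : pvS xs = xs.length := by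
  cases xs with
  | nil => simp [pvS]
  | cons x r =>
      have h1 : pvP (x :: r) PySem.Set.empty = (x :: r).length := by
        have hge := pvP_ge (x :: r) PySem.Set.empty (x :: r).length le_rfl (by simpa using h)
          (by intro a _ ha; simp [PySem.Set.empty] at ha)
        have hle := pvP_le_length (x :: r) PySem.Set.empty
        omega
      have h2 : pvS r ≤ r.length := pvS_le_length r
      simp only [pvS, h1, List.length_cons]
      omega


-- elements of a run are new: nothing in xs.take (pvP xs seen) lies in seen
theorem pvP_take_not_mem (xs : List Int) (seen : PySem.Set Int) :
    ∀ a ∈ xs.take (pvP xs seen), a ∉ seen := by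
  induction xs generalizing seen with
  | nil => simp [pvP]
  | cons x rest ih =>
      simp only [pvP]
      split
      · simp
      · rename_i hx
        rw [PySem.Set.contains_iff] at hx
        intro a ha
        rw [List.take_succ_cons] at ha
        rcases List.mem_cons.mp ha with rfl | ha
        · intro hmem
          exact hx hmem
        · intro hmem
          exact ih (PySem.Set.add seen x) a ha (by rw [PySem.Set.mem_add]; exact Or.inl hmem)

-- the run xs.take (pvP xs seen) has no duplicates
theorem pvP_take_nodup (xs : List Int) (seen : PySem.Set Int) :
    (xs.take (pvP xs seen)).Nodup := by
  induction xs generalizing seen with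
  | nil => simp
  | cons x rest ih =>
      simp only [pvP]
      split
      · simp
      · rw [List.take_succ_cons, List.nodup_cons]
        refine ⟨?_, ih (PySem.Set.add seen x)⟩
        intro hmem
        exact pvP_take_not_mem rest (PySem.Set.add seen x) x hmem
          (by rw [PySem.Set.mem_add]; exact Or.inr rfl)

theorem pvS_le_of_forall (l : List Int) (B : Nat)
    (h : ∀ s, pvP (l.drop s) PySem.Set.empty ≤ B) : pvS l ≤ B := by
  induction l with
  | nil => simp [pvS]
  | cons x r ih =>
      simp only [pvS, max_le_iff]
      exact ⟨by simpa using h 0, ih (fun s => by simpa using h (s + 1))⟩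

theorem pvS_drop_le (l : List Int) (t : Nat) : pvS (l.drop t) ≤ pvS l := by
  induction l generalizing t with
  | nil => simp
  | cons x r ih =>
      cases t with
      | zero => simp
      | succ u =>
          rw [List.drop_succ_cons]
          exact le_trans (ih u) (le_max_right _ _)

-- extending the window [t, h) by the element at h
theorem wnd_succ (array : List Int) (t h : Nat) (ht : t ≤ h) (hh : h < array.length) :
    (array.drop t).take (h + 1 - t)
      = (array.drop t).take (h - t) ++ [array[h]] := by
  have h1 : h + 1 - t = (h - t) + 1 := by omega
  rw [h1, List.take_add_one, List.getElem?_drop]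
  have h2 : t + (h - t) = h := by omega
  rw [h2, List.getElem?_eq_getElem hh]
  rfl

-- a smaller take of a Nodup take is Nodup
theorem nodup_take_mono (l : List Int) (m m' : Nat) (h : m ≤ m')
    (hn : (l.take m').Nodup) : (l.take m).Nodup := by
  have : l.take m = (l.take m').take m := by
    rw [List.take_take, Nat.min_eq_left h]
  rw [this]
  exact hn.sublist (List.take_sublist _ _)

-- moving the left end of a Nodup window to the right keeps it Nodup
theorem wnd_nodup_mono (array : List Int) (t t' h : Nat) (ht : t ≤ t')
    (hn : ((array.drop t).take (h - t)).Nodup) :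
    ((array.drop t').take (h - t')).Nodup := by
  have : (array.drop t').take (h - t') = ((array.drop t).take (h - t)).drop (t' - t) := by
    rw [List.drop_take, List.drop_drop]
    have h1 : t + (t' - t) = t' := by omega
    have h2 : h - t - (t' - t) = h - t' := by omega
    rw [h1, h2]
  rw [this]
  exact hn.sublist (List.drop_sublist _ _)

-- membership in the window [t, h) as an index condition
theorem mem_wnd_iff (array : List Int) (t h : Nat) (x : Int) (hh : h ≤ array.length) :
    x ∈ (array.drop t).take (h - t)
      ↔ ∃ j, t ≤ j ∧ j < h ∧ array[j]? = some x := by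
  constructor
  · intro hx
    obtain ⟨i, hi, hix⟩ := List.mem_iff_getElem.mp hx
    have hlen : i < h - t ∧ i < array.length - t := by
      simpa [List.length_take, List.length_drop] using hi
    refine ⟨t + i, by omega, by omega, ?_⟩
    rw [List.getElem_take, List.getElem_drop] at hix
    rw [List.getElem?_eq_getElem (by omega), hix]
  · rintro ⟨j, htj, hjh, hjx⟩
    have hjn : j < array.length := by omega
    rw [List.getElem?_eq_getElem hjn, Option.some_inj] at hjx
    apply List.mem_iff_getElem.mpr
    have hlen : j - t < ((array.drop t).take (h - t)).length := by
      simp only [List.length_take, List.length_drop]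
      omega
    refine ⟨j - t, hlen, ?_⟩
    rw [List.getElem_take, List.getElem_drop]
    have he : t + (j - t) = j := by omega
    simp only [he]
    exact hjx

-- two equal entries make the window [t, h) not Nodup
theorem wnd_not_nodup_of_dup (array : List Int) (t h i j : Nat)
    (h1 : t ≤ i) (h2 : i < j) (h3 : j < h) (h4 : h ≤ array.length)
    (h5 : ∃ v, array[i]? = some v ∧ array[j]? = some v) :
    ¬ ((array.drop t).take (h - t)).Nodup := by
  intro hn
  obtain ⟨v, hiv, hjv⟩ := h5
  have hin : i < array.length := by omega
  have hjn : j < array.length := by omega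
  rw [List.getElem?_eq_getElem hin, Option.some_inj] at hiv
  rw [List.getElem?_eq_getElem hjn, Option.some_inj] at hjv
  have hleni : i - t < ((array.drop t).take (h - t)).length := by
    simp only [List.length_take, List.length_drop]; omega
  have hlenj : j - t < ((array.drop t).take (h - t)).length := by
    simp only [List.length_take, List.length_drop]; omega
  have heq : ((array.drop t).take (h - t))[i - t]'hleni
      = ((array.drop t).take (h - t))[j - t]'hlenj := by
    rw [List.getElem_take, List.getElem_drop, List.getElem_take, List.getElem_drop]
    have e1 : t + (i - t) = i := by omega
    have e2 : t + (j - t) = j := by omega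
    simp only [e1, e2]
    rw [hiv, hjv]
  have := (hn.getElem_inj_iff).mp heq
  omega

-- the last-occurrence dictionary stays correct after recording index head
theorem lastD_insert (array : List Int) (last : PySem.Dict Int Int) (head : Nat)
    (hh : head < array.length)
    (hD : ∀ v k, PySem.Dict.get? last v = some k →
        ∃ kn : Nat, k = (kn : Int) ∧ kn < head ∧ array[kn]? = some v ∧
          ∀ j, kn < j → j < head → array[j]? ≠ some v) :
    ∀ v k, PySem.Dict.get? (PySem.Dict.insert last array[head] (head : Int)) v = some k →
        ∃ kn : Nat, k = (kn : Int) ∧ kn < head + 1 ∧ array[kn]? = some v ∧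
          ∀ j, kn < j → j < head + 1 → array[j]? ≠ some v := by
  intro v k hget
  rw [PySem.Dict.get?_insert] at hget
  split at hget
  · rename_i hv
    rw [Option.some_inj] at hget
    subst hv
    exact ⟨head, hget.symm, by omega, List.getElem?_eq_getElem hh, by omega⟩
  · rename_i hv
    obtain ⟨kn, hk, hkh, hkv, hlast⟩ := hD v k hget
    refine ⟨kn, hk, by omega, hkv, ?_⟩
    intro j hkj hjh hjv
    by_cases hj : j < head
    · exact hlast j hkj hj hjv
    · have : j = head := by omega
      subst this
      rw [List.getElem?_eq_getElem hh, Option.some_inj] at hjv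
      exact hv hjv.symm

-- every value occurring before head+1 has an entry after recording index head
theorem lastC_insert (array : List Int) (last : PySem.Dict Int Int) (head : Nat)
    (hh : head < array.length)
    (hC : ∀ j, j < head → ∀ v, array[j]? = some v → PySem.Dict.get? last v ≠ none) :
    ∀ j, j < head + 1 → ∀ v, array[j]? = some v →
      PySem.Dict.get? (PySem.Dict.insert last array[head] (head : Int)) v ≠ none := by
  intro j hj v hjv
  rw [PySem.Dict.get?_insert]
  split
  · simp
  · rename_i hv
    by_cases hjh : j < head
    · exact hC j hjh v hjv
    · have : j = head := by omega
      subst this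
      rw [List.getElem?_eq_getElem hh, Option.some_inj] at hjv
      exact absurd hjv.symm hv

-- preservation of the best-covers-all-finished-runs invariant for one step
theorem h5_step (array : List Int) (tail' best best' head : Nat)
    (hM' : ∀ t, t < tail' → ¬ ((array.drop t).take (head + 1 - t)).Nodup)
    (h5 : ∀ s, s + pvP (array.drop s) PySem.Set.empty ≤ head →
        pvP (array.drop s) PySem.Set.empty ≤ best)
    (hb : best ≤ best') (hb2 : head + 1 - tail' ≤ best') :
    ∀ s, s + pvP (array.drop s) PySem.Set.empty ≤ head + 1 →
      pvP (array.drop s) PySem.Set.empty ≤ best' := by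
  intro s hs
  by_cases hsh : s + pvP (array.drop s) PySem.Set.empty ≤ head
  · exact le_trans (h5 s hsh) hb
  · have hpl : pvP (array.drop s) PySem.Set.empty = head + 1 - s ∧ s ≤ head + 1 := by omega
    have hrun : (((array.drop s)).take (head + 1 - s)).Nodup := by
      rw [← hpl.1]
      exact pvP_take_nodup _ _
    have hst : tail' ≤ s := by
      by_contra hlt
      exact hM' s (by omega) hrun
    omega

-- the loop invariant of A: window array[tail:head-1] has no duplicates and its length is
-- already recorded in best; then the loop returns max(best, best distinct length over suffixes)
theorem pvALoop_eq (array : List Int) (tail head : Nat) (best : Int)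
    (h1 : tail < head) (h2 : head ≤ array.length + 1)
    (h3 : ((array.drop tail).take (head - 1 - tail)).Nodup)
    (h4 : ((head - 1 - tail : Nat) : Int) ≤ best) :
    pvALoop array tail head best = max best ((pvS (array.drop tail) : Int)) := by
  rw [pvALoop_unfold]
  by_cases hc : head ≤ array.length ∧ tail ≠ head
  · rw [if_pos hc]
    obtain ⟨hhn, -⟩ := hc
    have hWlen : ((array.drop tail).take (head - tail)).length = head - tail := by
      simp only [List.length_take, List.length_drop]
      omega
    by_cases hd : ((array.drop tail).take (head - tail)).length
        = (PySem.Set.ofList ((array.drop tail).take (head - tail))).length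
    · -- window distinct: head advances, the new length is recorded
      rw [if_pos hd]
      have hWnd : ((array.drop tail).take (head - tail)).Nodup :=
        (set_len_eq_iff_nodup _).mp hd
      have hslen : (PySem.Set.ofList ((array.drop tail).take (head - tail))).length = head - tail := by
        omega
      rw [hslen]
      have hPge : head - tail ≤ pvP (array.drop tail) PySem.Set.empty := by
        apply pvP_ge _ _ _ (by simp; omega) hWnd
        intro a _ ha
        simp [PySem.Set.empty] at ha
      have hPS := pvP_le_pvS (array.drop tail)
      rw [pvALoop_eq array tail (head + 1)
            (if ((head - tail : Nat) : Int) > best then ((head - tail : Nat) : Int) else best)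
            (by omega) (by omega)
            (by have : head + 1 - 1 - tail = head - tail := by omega
                rw [this]; exact hWnd)
            (by have : head + 1 - 1 - tail = head - tail := by omega
                rw [this]; split <;> omega)]
      split <;> omega
    · -- window has a repeat: tail advances; the dropped suffix's best prefix is head-1-tail ≤ best
      rw [if_neg hd]
      have hWnnd : ¬ ((array.drop tail).take (head - tail)).Nodup := by
        intro hnd
        exact hd ((set_len_eq_iff_nodup _).mpr hnd)
      have hW2 : 2 ≤ head - tail := by
        by_contra hle
        exact hWnnd (nodup_of_len_le_one _ (by omega))
      have hW2' : 2 ≤ array.length - tail := by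
        by_contra hle
        apply hWnnd
        apply nodup_of_len_le_one
        simp only [List.length_take, List.length_drop]
        omega
      have htn : tail < array.length := by omega
      have hdrop : array.drop tail = array[tail] :: array.drop (tail + 1) :=
        List.drop_eq_getElem_cons htn
      have hPeq : pvP (array.drop tail) PySem.Set.empty = head - 1 - tail := by
        have hle' : pvP (array.drop tail) PySem.Set.empty ≤ head - 1 - tail := by
          apply pvP_le_of_not_nodup
          have : head - 1 - tail + 1 = head - tail := by omega
          rw [this]
          exact hWnnd
        have hge' : head - 1 - tail ≤ pvP (array.drop tail) PySem.Set.empty := by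
          apply pvP_ge _ _ _ (by simp; omega) h3
          intro a _ ha
          simp [PySem.Set.empty] at ha
        omega
      have h3' : ((array.drop (tail + 1)).take (head - 1 - (tail + 1))).Nodup := by
        rw [hdrop] at h3
        have heq : head - 1 - tail = (head - 1 - (tail + 1)) + 1 := by omega
        rw [heq, List.take_succ_cons, List.nodup_cons] at h3
        exact h3.2
      rw [pvALoop_eq array (tail + 1) head best (by omega) h2 h3' (by
        have : ((head - 1 - (tail + 1) : Nat) : Int) ≤ ((head - 1 - tail : Nat) : Int) := by
          omega
        omega)]
      have hS : pvS (array.drop tail)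
          = max (pvP (array.drop tail) PySem.Set.empty) (pvS (array.drop (tail + 1))) := by
        conv_lhs => rw [hdrop]
        rw [pvS, ← hdrop]
      rw [hS, hPeq]
      omega
  · -- loop exit: head = length+1, the whole remaining suffix is distinct and already recorded
    rw [if_neg hc]
    have hhead : head = array.length + 1 := by
      rcases Decidable.not_and_iff_or_not.mp hc with h | h
      · omega
      · exact absurd (by omega : tail ≠ head) h
    have hfull : (array.drop tail).take (head - 1 - tail) = array.drop tail := by
      apply List.take_of_length_le
      simp only [List.length_drop]
      omega
    have hnd : (array.drop tail).Nodup := hfull ▸ h3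
    have hSlen : pvS (array.drop tail) = array.length - tail := by
      rw [pvS_of_nodup _ hnd, List.length_drop]
    rw [hSlen]
    have : ((array.length - tail : Nat) : Int) ≤ best := by
      have : head - 1 - tail = array.length - tail := by omega
      rw [← this]; exact h4
    omega
termination_by 2 * (array.length + 1 - head) + (head - tail)
decreasing_by
  · omega
  · omega


theorem nodup_append_singleton (l : List Int) (x : Int) (h1 : l.Nodup) (h2 : x ∉ l) :
    (l ++ [x]).Nodup := by
  simp only [List.nodup_append, List.nodup_singleton]
  refine ⟨h1, trivial, ?_⟩
  intro a ha b hb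
  simp only [List.mem_singleton] at hb
  subst hb
  intro h
  exact h2 (h ▸ ha)

-- the sliding-window loop invariant of B: last = last occurrence before head of each seen value,
-- the window [tail, head) is duplicate-free and left-maximal, best covers every finished run
theorem pvWinLoop_eq (array : List Int) (last : PySem.Dict Int Int) (tail best head : Nat)
    (h1 : tail ≤ head) (h2 : head ≤ array.length)
    (hD : ∀ v k, PySem.Dict.get? last v = some k →
        ∃ kn : Nat, k = (kn : Int) ∧ kn < head ∧ array[kn]? = some v ∧
          ∀ j, kn < j → j < head → array[j]? ≠ some v)
    (hC : ∀ j, j < head → ∀ v, array[j]? = some v → PySem.Dict.get? last v ≠ none)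
    (hW : ((array.drop tail).take (head - tail)).Nodup)
    (hM : ∀ t, t < tail → ¬ ((array.drop t).take (head - t)).Nodup)
    (h5 : ∀ s, s + pvP (array.drop s) PySem.Set.empty ≤ head →
        pvP (array.drop s) PySem.Set.empty ≤ best)
    (h6 : best ≤ pvS array) :
    pvWinLoop array last tail best head = pvS array := by
  rw [pvWinLoop]
  by_cases hh : head < array.length
  · rw [if_pos hh]
    simp only [PySem.List.pyGetD_natCast, List.getD_eq_getElem _ _ hh]
    have hxin : array[head]? = some array[head] := List.getElem?_eq_getElem hh
    split
    · -- x was seen last at index kn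
      rename_i k hget
      obtain ⟨kn, hkkn, hknh, hknv, hlast⟩ := hD _ k hget
      subst hkkn
      by_cases htk : (tail : Int) ≤ (kn : Int)
      · -- previous occurrence inside the window: tail jumps to kn+1
        rw [if_pos htk]
        have htkn : tail ≤ kn := by exact_mod_cast htk
        have htn : ((kn : Int) + 1).toNat = kn + 1 := by omega
        rw [htn]
        have hW' : ((array.drop (kn + 1)).take (head + 1 - (kn + 1))).Nodup := by
          rw [wnd_succ array (kn + 1) head (by omega) hh]
          apply nodup_append_singleton
          · exact wnd_nodup_mono array tail (kn + 1) head (by omega) hW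
          · intro hmem
            obtain ⟨j, htj, hjh, hjv⟩ := (mem_wnd_iff array (kn + 1) head _ (by omega)).mp hmem
            exact hlast j (by omega) hjh hjv
        have hM' : ∀ t, t < kn + 1 → ¬ ((array.drop t).take (head + 1 - t)).Nodup := by
          intro t ht
          exact wnd_not_nodup_of_dup array t (head + 1) kn head (by omega) (by omega)
            (by omega) (by omega) ⟨array[head], hknv, hxin⟩
        have hb : best ≤ (if head + 1 - (kn + 1) > best then head + 1 - (kn + 1) else best) := by
          split <;> omega
        have hb2 : head + 1 - (kn + 1)
            ≤ (if head + 1 - (kn + 1) > best then head + 1 - (kn + 1) else best) := by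
          split <;> omega
        have h6' : (if head + 1 - (kn + 1) > best then head + 1 - (kn + 1) else best)
            ≤ pvS array := by
          have hple : head + 1 - (kn + 1) ≤ pvP (array.drop (kn + 1)) PySem.Set.empty := by
            apply pvP_ge _ _ _ (by simp; omega) hW'
            intro a _ ha
            simp [PySem.Set.empty] at ha
          have := le_trans hple (le_trans (pvP_le_pvS _) (pvS_drop_le array (kn + 1)))
          split <;> omega
        exact pvWinLoop_eq array (PySem.Dict.insert last array[head] (head : Int)) (kn + 1) _
          (head + 1) (by omega) (by omega)
          (lastD_insert array last head hh hD) (lastC_insert array last head hh hC)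
          hW' hM' (h5_step array (kn + 1) best _ head hM' h5 hb hb2) h6'
      · -- previous occurrence left of the window: x is not in the window, the window grows
        rw [if_neg htk]
        have hknt : kn < tail := by
          have := not_le.mp htk
          exact_mod_cast this
        have hxnot : array[head] ∉ (array.drop tail).take (head - tail) := by
          intro hmem
          obtain ⟨j, htj, hjh, hjv⟩ := (mem_wnd_iff array tail head _ (by omega)).mp hmem
          exact hlast j (by omega) hjh hjv
        have hW' : ((array.drop tail).take (head + 1 - tail)).Nodup := by
          rw [wnd_succ array tail head h1 hh]
          exact nodup_append_singleton _ _ hW hxnot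
        have hM' : ∀ t, t < tail → ¬ ((array.drop t).take (head + 1 - t)).Nodup := by
          intro t ht hnd
          exact hM t ht (nodup_take_mono _ _ _ (by omega) hnd)
        have hb : best ≤ (if head + 1 - tail > best then head + 1 - tail else best) := by
          split <;> omega
        have hb2 : head + 1 - tail ≤ (if head + 1 - tail > best then head + 1 - tail else best) := by
          split <;> omega
        have h6' : (if head + 1 - tail > best then head + 1 - tail else best) ≤ pvS array := by
          have hple : head + 1 - tail ≤ pvP (array.drop tail) PySem.Set.empty := by
            apply pvP_ge _ _ _ (by simp; omega) hW'
            intro a _ ha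
            simp [PySem.Set.empty] at ha
          have := le_trans hple (le_trans (pvP_le_pvS _) (pvS_drop_le array tail))
          split <;> omega
        exact pvWinLoop_eq array (PySem.Dict.insert last array[head] (head : Int)) tail _
          (head + 1) (by omega) (by omega)
          (lastD_insert array last head hh hD) (lastC_insert array last head hh hC)
          hW' hM' (h5_step array tail best _ head hM' h5 hb hb2) h6'
    · -- x unseen so far: it is not in the window; the window grows
      rename_i hget
      have hxnot : array[head] ∉ (array.drop tail).take (head - tail) := by
        intro hmem
        obtain ⟨j, htj, hjh, hjv⟩ := (mem_wnd_iff array tail head _ (by omega)).mp hmem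
        exact hC j hjh _ hjv hget
      have hW' : ((array.drop tail).take (head + 1 - tail)).Nodup := by
        rw [wnd_succ array tail head h1 hh]
        exact nodup_append_singleton _ _ hW hxnot
      have hM' : ∀ t, t < tail → ¬ ((array.drop t).take (head + 1 - t)).Nodup := by
        intro t ht hnd
        exact hM t ht (nodup_take_mono _ _ _ (by omega) hnd)
      have hb : best ≤ (if head + 1 - tail > best then head + 1 - tail else best) := by
        split <;> omega
      have hb2 : head + 1 - tail ≤ (if head + 1 - tail > best then head + 1 - tail else best) := by
        split <;> omega
      have h6' : (if head + 1 - tail > best then head + 1 - tail else best) ≤ pvS array := by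
        have hple : head + 1 - tail ≤ pvP (array.drop tail) PySem.Set.empty := by
          apply pvP_ge _ _ _ (by simp; omega) hW'
          intro a _ ha
          simp [PySem.Set.empty] at ha
        have := le_trans hple (le_trans (pvP_le_pvS _) (pvS_drop_le array tail))
        split <;> omega
      exact pvWinLoop_eq array (PySem.Dict.insert last array[head] (head : Int)) tail _
        (head + 1) (by omega) (by omega)
        (lastD_insert array last head hh hD) (lastC_insert array last head hh hC)
        hW' hM' (h5_step array tail best _ head hM' h5 hb hb2) h6'
  · -- head = array.length: every run is finished, best already equals pvS
    rw [if_neg hh]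
    refine le_antisymm h6 (pvS_le_of_forall array best ?_)
    intro s
    by_cases hs : s ≤ array.length
    · apply h5
      have := pvP_le_length (array.drop s) PySem.Set.empty
      simp only [List.length_drop] at this
      omega
    · rw [List.drop_eq_nil_iff.mpr (by omega)]
      simp [pvP]
termination_by array.length - head
decreasing_by all_goals omega

-- ===== VERDICT (by name: the statement is the Claim_ definition above) =====
theorem long_distinct_subarray_spec : Claim_equal_long_distinct_subarray := by
  intro array _
  unfold Spec_long_distinct_subarray long_distinct_subarray long_distinct_subarray_alt
  rw [pvWinLoop_eq array PySem.Dict.empty 0 0 0 (by omega) (by omega)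
        (by intro v k h; rw [PySem.Dict.get?_empty] at h; exact absurd h (by simp))
        (by intro j hj; omega)
        (by simp)
        (by intro t ht; omega)
        (by intro s hs; have := pvP_le_length (array.drop s) PySem.Set.empty; omega)
        (by exact Nat.zero_le _),
      pvALoop_eq array 0 1 0 (by omega) (by omega) (by simp) (by simp)]
  simp only [List.drop_zero]
  omega
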